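-- pv_equiv track=rewrite | github.com/yofn/pyacm | div3/1426/f.py | f
-- ===== SOURCE A (Python) =====
-- def f(s):
--     _,a,ab,abc = 1,0,0,0
--     for c in s:
--         if   c=='a':
--             a   += _
--         elif c=='b':
--             ab  += a
--         elif c=='c':
--             abc += ab
--         else:
--             abc *= 3
--             abc += ab
--             ab  *= 3
--             ab  += a
--             a   *= 3
--             a   += _
--             _   *= 3
--     return abc%1000000007
-- ===== SOURCE B (Python) =====
-- def f(s):
--     M = 1000000007
--     n = len(s)
--     # forward pass: A[j] = weighted count (mod M) of a single first letter in s[:j]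
--     A = [0]*n
--     a, pw = 0, 1
--     for j, ch in enumerate(s):
--         A[j] = a
--         if ch == 'a':
--             a = (a + pw) % M
--         elif ch not in 'bc':
--             a, pw = (3*a + pw) % M, 3*pw % M
--     # backward pass: C[j] = weighted count (mod M) of a single last letter in s[j+1:]
--     C = [0]*n
--     c, qw = 0, 1
--     for j in range(n-1, -1, -1):
--         C[j] = c
--         ch = s[j]
--         if ch == 'c':
--             c = (c + qw) % M
--         elif ch not in 'ab':
--             c, qw = (3*c + qw) % M, 3*qw % M
--     return sum(x*y for ch, x, y in zip(s, A, C) if ch != 'a' and ch != 'c') % M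
-- ===== Notes on version B (the rewrite author's own statement) =====
-- stated objective: faster
-- what changed: Replaces A's single four-state left-to-right DP sweep (which keeps exact, exponentially growing big integers and reduces only at the end) by a meet-in-the-middle decomposition: a forward pass of weighted prefix counts and a backward pass of weighted suffix counts, both reduced modulo 1000000007 at every step, combined by a product sum over the possible middle positions.
import Mathlib
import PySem

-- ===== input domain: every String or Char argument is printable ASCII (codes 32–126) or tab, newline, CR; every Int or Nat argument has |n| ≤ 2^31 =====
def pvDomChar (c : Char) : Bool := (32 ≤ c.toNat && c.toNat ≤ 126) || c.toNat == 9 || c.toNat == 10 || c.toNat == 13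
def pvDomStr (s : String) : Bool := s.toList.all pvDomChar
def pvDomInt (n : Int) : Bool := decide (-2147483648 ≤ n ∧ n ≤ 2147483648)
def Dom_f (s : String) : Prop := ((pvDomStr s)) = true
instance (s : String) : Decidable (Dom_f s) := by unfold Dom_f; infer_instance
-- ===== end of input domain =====

-- B replaces A's single four-state left-to-right DP sweep by a meet-in-the-middle
-- decomposition (forward prefix pass, backward suffix pass, product sum over middle
-- positions, reducing modulo 1000000007 as it goes, which keeps the numbers word-sized).

-- ===== PORT A =====
-- A's loop step on the state (_, a, ab, abc)
def fStep (st : Int × Int × Int × Int) (c : Char) : Int × Int × Int × Int :=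
  if c == 'a' then (st.1, st.2.1 + st.1, st.2.2.1, st.2.2.2)
  else if c == 'b' then (st.1, st.2.1, st.2.2.1 + st.2.1, st.2.2.2)
  else if c == 'c' then (st.1, st.2.1, st.2.2.1, st.2.2.2 + st.2.2.1)
  else (3 * st.1, 3 * st.2.1 + st.1, 3 * st.2.2.1 + st.2.1, 3 * st.2.2.2 + st.2.2.1)

def f (s : String) : Int :=
  PySem.Int.mod ((s.toList.foldl fStep (1, 0, 0, 0)).2.2.2) 1000000007

-- ===== PORT B =====
-- Source B's constant M
def pvM : Int := 1000000007

-- forward pass: list A[j] = weighted count (mod M) of one leading letter in the prefix before j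
def fwdA : List Char → Int → Int → List Int
  | [], _, _ => []
  | ch :: t, a, pw =>
    if ch == 'a' then a :: fwdA t (PySem.Int.mod (a + pw) pvM) pw
    else if ch == 'b' || ch == 'c' then a :: fwdA t a pw
    else a :: fwdA t (PySem.Int.mod (3 * a + pw) pvM) (PySem.Int.mod (3 * pw) pvM)

-- backward pass (Python's descending-index loop): returns (C list, final c, final qw)
def bwdC : List Char → List Int × Int × Int
  | [] => ([], 0, 1)
  | ch :: t =>
    let r := bwdC t
    if ch == 'c' then (r.2.1 :: r.1, PySem.Int.mod (r.2.1 + r.2.2) pvM, r.2.2)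
    else if ch == 'a' || ch == 'b' then (r.2.1 :: r.1, r.2.1, r.2.2)
    else (r.2.1 :: r.1, PySem.Int.mod (3 * r.2.1 + r.2.2) pvM, PySem.Int.mod (3 * r.2.2) pvM)

-- the zip-sum over middle positions (characters that are neither the first nor the last letter)
def midSum : List Char → List Int → List Int → Int
  | ch :: t, x :: xs, y :: ys =>
      (if ch == 'a' || ch == 'c' then 0 else x * y) + midSum t xs ys
  | _, _, _ => 0

def f_alt (s : String) : Int :=
  PySem.Int.mod (midSum s.toList (fwdA s.toList 0 1) (bwdC s.toList).1) pvM

-- ===== PRECONDITION & SPEC =====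
def Spec_f (s : String) (out : Int) : Prop := out = f_alt s
instance (s : String) (out : Int) : Decidable (Spec_f s out) := by unfold Spec_f; infer_instance

-- ===== CLAIM (what is proved, stated in full; the proofs are below) =====
def Claim_equal_f : Prop := ∀ (s : String), Dom_f s → Spec_f s (f s)

-- ===== LEMMAS AND PROOFS =====

-- unreduced (no-mod) versions of B's two passes, used only by the proof
def fwdP : List Char → Int → Int → List Int
  | [], _, _ => []
  | ch :: t, a, pw =>
    if ch == 'a' then a :: fwdP t (a + pw) pw
    else if ch == 'b' || ch == 'c' then a :: fwdP t a pw
    else a :: fwdP t (3 * a + pw) (3 * pw)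

def bwdP : List Char → List Int × Int × Int
  | [] => ([], 0, 1)
  | ch :: t =>
    let r := bwdP t
    if ch == 'c' then (r.2.1 :: r.1, r.2.1 + r.2.2, r.2.2)
    else if ch == 'a' || ch == 'b' then (r.2.1 :: r.1, r.2.1, r.2.2)
    else (r.2.1 :: r.1, 3 * r.2.1 + r.2.2, 3 * r.2.2)

-- 3^(number of wildcard characters in t)
def pow3w : List Char → Int
  | [] => 1
  | ch :: t => (if ch == 'a' || ch == 'b' || ch == 'c' then 1 else 3) * pow3w t

-- Σ over middle positions j of A[j] * 3^(wildcards after j)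
def abSum : List Char → List Int → Int
  | ch :: t, x :: xs => (if ch == 'a' || ch == 'c' then 0 else x * pow3w t) + abSum t xs
  | _, _ => 0

theorem bwdP_qw (t : List Char) : (bwdP t).2.2 = pow3w t := by
  induction t with
  | nil => simp [bwdP, pow3w]
  | cons ch t ih =>
    by_cases h1 : ch = 'c' <;> by_cases h2 : ch = 'a' <;> by_cases h3 : ch = 'b' <;>
      simp [bwdP, pow3w, h1, h2, h3, ih]

-- the meet-in-the-middle invariant: A's ab- and abc-components against the unreduced passes
theorem main_inv (t : List Char) : ∀ (u a ab abc : Int),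
    (t.foldl fStep (u, a, ab, abc)).2.2.1
      = ab * pow3w t + abSum t (fwdP t a u)
    ∧ (t.foldl fStep (u, a, ab, abc)).2.2.2
      = abc * pow3w t + ab * (bwdP t).2.1 + midSum t (fwdP t a u) (bwdP t).1 := by
  induction t with
  | nil => intro u a ab abc; simp [pow3w, abSum, midSum, bwdP]
  | cons ch t ih =>
    intro u a ab abc
    by_cases h1 : ch = 'a'
    · subst h1
      simp [List.foldl, fStep, fwdP, bwdP, pow3w, abSum, midSum]
      exact ⟨by rw [(ih u (a + u) ab abc).1], by rw [(ih u (a + u) ab abc).2]⟩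
    · by_cases h2 : ch = 'b'
      · subst h2
        simp [List.foldl, fStep, fwdP, bwdP, pow3w, abSum, midSum]
        refine ⟨?_, ?_⟩
        · rw [(ih u a (ab + a) abc).1]; ring
        · rw [(ih u a (ab + a) abc).2]; ring
      · by_cases h3 : ch = 'c'
        · subst h3
          simp [List.foldl, fStep, fwdP, bwdP, pow3w, abSum, midSum]
          refine ⟨?_, ?_⟩
          · rw [(ih u a ab (abc + ab)).1]
          · rw [(ih u a ab (abc + ab)).2, bwdP_qw]; ring
        · simp [List.foldl, fStep, fwdP, bwdP, pow3w, abSum, midSum, h1, h2, h3]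
          refine ⟨?_, ?_⟩
          · rw [(ih (3 * u) (3 * a + u) (3 * ab + a) (3 * abc + ab)).1]; ring
          · rw [(ih (3 * u) (3 * a + u) (3 * ab + a) (3 * abc + ab)).2, bwdP_qw]; ring

-- ===== the mod-reduction transfer layer =====

theorem mod_modeq (x : Int) : PySem.Int.mod x pvM ≡ x [ZMOD pvM] := by
  rw [PySem.Int.mod_eq_emod_of_pos (by norm_num [pvM])]
  exact Int.emod_emod_of_dvd x dvd_rfl

theorem fwd_congr (t : List Char) : ∀ (a a' pw pw' : Int),
    a ≡ a' [ZMOD pvM] → pw ≡ pw' [ZMOD pvM] →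
    List.Forall₂ (fun x y => x ≡ y [ZMOD pvM]) (fwdP t a pw) (fwdA t a' pw') := by
  induction t with
  | nil => intro a a' pw pw' _ _; simp [fwdP, fwdA]
  | cons ch t ih =>
    intro a a' pw pw' ha hpw
    by_cases h1 : ch = 'a'
    · subst h1
      simp [fwdP, fwdA]
      exact ⟨ha, ih _ _ _ _ ((ha.add hpw).trans (mod_modeq _).symm) hpw⟩
    · by_cases h2 : ch = 'b'
      · subst h2
        simp [fwdP, fwdA]
        exact ⟨ha, ih _ _ _ _ ha hpw⟩
      · by_cases h3 : ch = 'c'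
        · subst h3
          simp [fwdP, fwdA]
          exact ⟨ha, ih _ _ _ _ ha hpw⟩
        · simp [fwdP, fwdA, h1, h2, h3]
          exact ⟨ha, ih _ _ _ _
            ((((Int.ModEq.refl 3).mul ha).add hpw).trans (mod_modeq _).symm)
            (((Int.ModEq.refl 3).mul hpw).trans (mod_modeq _).symm)⟩

theorem bwd_congr (t : List Char) :
    List.Forall₂ (fun x y => x ≡ y [ZMOD pvM]) (bwdP t).1 (bwdC t).1
    ∧ (bwdP t).2.1 ≡ (bwdC t).2.1 [ZMOD pvM]
    ∧ (bwdP t).2.2 ≡ (bwdC t).2.2 [ZMOD pvM] := by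
  induction t with
  | nil => simp [bwdP, bwdC]
  | cons ch t ih =>
    obtain ⟨hl, hc, hq⟩ := ih
    by_cases h1 : ch = 'c' <;> by_cases h2 : ch = 'a' <;> by_cases h3 : ch = 'b' <;>
      simp only [bwdP, bwdC, h1, h2, h3] <;> simp [h1, h2, h3] <;>
      first
      | exact ⟨⟨hc, hl⟩, (hc.add hq).trans (mod_modeq _).symm, hq⟩
      | exact ⟨⟨hc, hl⟩, hc, hq⟩
      | exact ⟨⟨hc, hl⟩,
          (((Int.ModEq.refl 3).mul hc).add hq).trans (mod_modeq _).symm,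
          (((Int.ModEq.refl 3).mul hq).trans (mod_modeq _).symm)⟩

theorem midSum_congr (t : List Char) : ∀ (xs xs' ys ys' : List Int),
    List.Forall₂ (fun x y => x ≡ y [ZMOD pvM]) xs xs' →
    List.Forall₂ (fun x y => x ≡ y [ZMOD pvM]) ys ys' →
    midSum t xs ys ≡ midSum t xs' ys' [ZMOD pvM] := by
  induction t with
  | nil => intro xs xs' ys ys' _ _; simp [midSum]
  | cons ch t ih =>
    intro xs xs' ys ys' hx hy
    cases hx with
    | nil => cases hy <;> simp [midSum]
    | cons hx0 hxs =>
      cases hy with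
      | nil => simp [midSum]
      | cons hy0 hys =>
        simp only [midSum]
        refine Int.ModEq.add ?_ (ih _ _ _ _ hxs hys)
        split_ifs with hm
        · rfl
        · exact hx0.mul hy0

-- ===== VERDICT (by name: the statement is the Claim_ definition above) =====
theorem f_spec : Claim_equal_f := by
  intro s _
  unfold Spec_f f f_alt
  rw [(main_inv s.toList 1 0 0 0).2]
  have hM : (1000000007 : Int) = pvM := rfl
  rw [hM, PySem.Int.mod_eq_emod_of_pos (b := pvM) (by norm_num [pvM]),
      PySem.Int.mod_eq_emod_of_pos (b := pvM) (by norm_num [pvM])]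
  have h := midSum_congr s.toList _ _ _ _
    (fwd_congr s.toList 0 0 1 1 (Int.ModEq.refl 0) (Int.ModEq.refl 1))
    (bwd_congr s.toList).1
  simpa using h
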